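-- pv_equiv track=rewrite | github.com/panlybero/trajectory-abstraction | state_description.py | get_least_general_generalization
-- ===== SOURCE A (Python) =====
-- def get_least_general_generalization(descriptions):
--     all_preds = set()
--     for d in descriptions:
--         for p in list(d):
--             all_preds.add(p)
--
--     for p in list(all_preds):
--         for d in descriptions:
--             if p not in d:
--                 all_preds.remove(p)
--                 break
--
--     return all_preds
-- ===== SOURCE B (Python) =====
-- def get_least_general_generalization(descriptions):
--     counts = {}
--     n = 0
--     for d in descriptions:
--         n += 1
--         for p in set(d):
--             counts[p] = counts.get(p, 0) + 1
--     return {p for p, c in counts.items() if c == n}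
-- ===== Notes on version B (the rewrite author's own statement) =====
-- stated objective: alternative
-- what changed: Replaces A's union-then-per-predicate rescan of all descriptions with one counting pass (distinct predicates per description) followed by a count==n threshold filter.
import Mathlib
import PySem

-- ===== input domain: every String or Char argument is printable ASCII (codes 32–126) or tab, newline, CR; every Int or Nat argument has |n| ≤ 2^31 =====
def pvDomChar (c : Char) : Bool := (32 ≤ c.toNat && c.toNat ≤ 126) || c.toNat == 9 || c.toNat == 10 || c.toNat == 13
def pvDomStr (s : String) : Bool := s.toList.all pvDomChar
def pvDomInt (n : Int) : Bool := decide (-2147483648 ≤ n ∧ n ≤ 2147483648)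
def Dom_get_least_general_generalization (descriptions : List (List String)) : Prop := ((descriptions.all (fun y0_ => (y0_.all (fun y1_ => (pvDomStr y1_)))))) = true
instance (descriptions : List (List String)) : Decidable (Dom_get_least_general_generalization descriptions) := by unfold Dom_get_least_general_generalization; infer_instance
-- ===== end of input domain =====

-- B replaces A's union-then-per-predicate rescan of every description with a single counting
-- pass over the descriptions followed by a count==n threshold filter (a different algorithm; not measured faster).
-- Both return a Python set; its hash iteration order is not modelled, the result is compared as a set.

-- ===== PORT A =====
def get_least_general_generalization (descriptions : List (List String)) : List String :=
  -- all_preds = set(); for d: for p in list(d): all_preds.add(p)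
  let all_preds : PySem.Set String :=
    descriptions.foldl (fun s d => d.foldl (fun s p => PySem.Set.add s p) s) PySem.Set.empty
  -- for p in list(all_preds): scan descriptions; on the FIRST d with p not in d, remove p and break
  -- (the break/scan is the existence test `any`); p is always still in the set when removed, so
  -- Python's set.remove never raises and the `.getD s` branch is unreachable
  all_preds.foldl
    (fun s p => if descriptions.any (fun d => !(d.contains p)) then (PySem.Set.remove? s p).getD s else s)
    all_preds

-- ===== PORT B =====
def get_least_general_generalization_alt (descriptions : List (List String)) : List String :=
  -- counts = {}; n = 0; for d: n += 1; for p in set(d): counts[p] = counts.get(p, 0) + 1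
  let st : PySem.Dict String Int × Int :=
    descriptions.foldl
      (fun st d => ((PySem.Set.ofList d).foldl (fun c p => c.modify p 0 (· + 1)) st.1, st.2 + 1))
      (PySem.Dict.empty, 0)
  -- {p for p, c in counts.items() if c == n}
  PySem.Set.ofList ((st.1.items.filter (fun pc => pc.2 == st.2)).map Prod.fst)

-- ===== PRECONDITION & SPEC =====
def Spec_get_least_general_generalization (descriptions : List (List String)) (out : List String) : Prop := out = get_least_general_generalization_alt descriptions
instance (descriptions : List (List String)) (out : List String) : Decidable (Spec_get_least_general_generalization descriptions out) := by unfold Spec_get_least_general_generalization; infer_instance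

-- ===== CLAIM (what is proved, stated in full; the proofs are below) =====
def Claim_equal_get_least_general_generalization : Prop := ∀ (descriptions : List (List String)), Dom_get_least_general_generalization descriptions → Spec_get_least_general_generalization descriptions (get_least_general_generalization descriptions)

-- ===== LEMMAS AND PROOFS =====

-- the pair fold of B splits into the counter fold and a length count
theorem pvB_fold_split (ds : List (List String)) (c : PySem.Dict String Int) (m : Int) :
    ds.foldl (fun st d => ((PySem.Set.ofList d).foldl (fun c p => c.modify p 0 (· + 1)) st.1, st.2 + 1)) (c, m)
      = (ds.foldl (fun c d => (PySem.Set.ofList d).foldl (fun c p => c.modify p 0 (· + 1)) c) c, m + ds.length) := by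
  induction ds generalizing c m with
  | nil => simp
  | cons d ds ih => simp [List.foldl_cons, ih]; omega

-- keys of B's counter = union set in first-occurrence order
theorem pvB_keys (ds : List (List String)) (c : PySem.Dict String Int) :
    (ds.foldl (fun c d => (PySem.Set.ofList d).foldl (fun c p => c.modify p 0 (· + 1)) c) c).keys
      = PySem.Set.update c.keys ds.flatten := by
  induction ds generalizing c with
  | nil => simp [PySem.Set.update_nil]
  | cons d ds ih =>
      rw [List.foldl_cons, ih, PySem.Dict.keys_foldl_modify (f := fun _ _ => (· + 1))]
      rw [List.flatten_cons, PySem.Set.update_append]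
      congr 1
      rw [PySem.Set.update_eq_append_filter, PySem.Set.update_eq_append_filter, PySem.Set.ofList_ofList]

-- counts in B's counter = number of descriptions containing the predicate
theorem pvB_getD (ds : List (List String)) (c : PySem.Dict String Int) (p : String) :
    (ds.foldl (fun c d => (PySem.Set.ofList d).foldl (fun c p => c.modify p 0 (· + 1)) c) c).getD p 0
      = c.getD p 0 + (ds.countP (fun d => d.contains p) : Int) := by
  induction ds generalizing c with
  | nil => simp
  | cons d ds ih =>
      rw [List.foldl_cons, ih, PySem.Dict.getD_foldl_modify_add_one]
      have hcnt : List.count p (PySem.Set.ofList d) = if d.contains p then 1 else 0 := by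
        by_cases h : p ∈ d
        · rw [if_pos (by simpa using h)]
          exact List.count_eq_one_of_mem (PySem.Set.nodup_ofList d)
            (by simpa [PySem.Set.mem_ofList] using h)
        · rw [if_neg (by simpa using h)]
          exact List.count_eq_zero_of_not_mem (by simpa [PySem.Set.mem_ofList] using h)
      rw [List.countP_cons, hcnt]
      by_cases h : d.contains p <;> simp <;> ring

-- A's removal loop over any list l, from any start list t, equals one filter
theorem pvA_removal (bad : String → Bool) (l t : List String) :
    l.foldl (fun s p => if bad p then (PySem.Set.remove? s p).getD s else s) t
      = t.filter (fun p => !(bad p && l.contains p)) := by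
  induction l generalizing t with
  | nil => simp
  | cons a l ih =>
      rw [List.foldl_cons, ih]
      by_cases hb : bad a
      · have hstep : (if bad a then (PySem.Set.remove? t a).getD t else t)
            = t.filter (fun p => !(p == a)) := by
          rw [if_pos hb]
          by_cases hm : a ∈ t
          · rw [PySem.Set.remove?_of_mem hm]; rfl
          · rw [(PySem.Set.remove?_eq_none_iff _ _).mpr hm]
            simp only [Option.getD_none]
            exact (List.filter_eq_self.mpr (fun x hx => by
              simpa using fun h : x = a => hm (h ▸ hx))).symm
        rw [hstep, List.filter_filter]
        apply List.filter_congr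
        intro x _
        by_cases hxa : x = a
        · subst hxa; simp [hb]
        · simp [hxa]
      · have hstep : (if bad a then (PySem.Set.remove? t a).getD t else t) = t := by
          rw [if_neg hb]
        rw [hstep]
        apply List.filter_congr
        intro x _
        by_cases hxa : x = a
        · subst hxa; simp [hb]
        · simp [hxa]

-- A's union fold is Set.ofList of the flattened input
theorem pvA_union (ds : List (List String)) :
    ds.foldl (fun s d => d.foldl (fun s p => PySem.Set.add s p) s) PySem.Set.empty
      = PySem.Set.ofList ds.flatten := by
  rw [PySem.Set.ofList_eq_foldl, List.foldl_flatten]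
  rfl

theorem get_least_general_generalization_eq (ds : List (List String)) :
    get_least_general_generalization ds = get_least_general_generalization_alt ds := by
  unfold get_least_general_generalization get_least_general_generalization_alt
  rw [pvB_fold_split]
  simp only
  set U : List String := PySem.Set.ofList ds.flatten with hU
  have hUnodup : U.Nodup := PySem.Set.nodup_ofList _
  set cdict : PySem.Dict String Int :=
    ds.foldl (fun c d => (PySem.Set.ofList d).foldl (fun c p => c.modify p 0 (· + 1)) c)
      PySem.Dict.empty with hc
  have hkeys : cdict.keys = U := by
    rw [hc, pvB_keys, PySem.Dict.keys_empty, PySem.Set.update_nil_left, hU]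
  have hitems : cdict.items = U.map (fun k => (k, cdict.getD k 0)) := by
    rw [PySem.Dict.items_eq_map_keys cdict (by rw [hkeys]; exact hUnodup) 0]
    rw [hkeys]
  have hgetD : ∀ p, cdict.getD p 0 = (ds.countP (fun d => d.contains p) : Int) := by
    intro p; rw [hc, pvB_getD]; simp
  rw [pvA_union, hitems, List.filter_map, List.map_map, pvA_removal]
  have hfun : (Prod.fst ∘ fun k => (k, cdict.getD k 0)) = id := rfl
  rw [hfun, List.map_id]
  have hfilter :
      U.filter (fun p => !((ds.any fun d => !d.contains p) && U.contains p))
        = U.filter ((fun pc => pc.2 == 0 + (ds.length : Int)) ∘ fun k => (k, cdict.getD k 0)) := by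
    apply List.filter_congr
    intro p hp
    have hcont : U.contains p = true := by simpa using hp
    simp only [Function.comp_apply, hcont, Bool.and_true, hgetD]
    rw [Bool.eq_iff_iff]
    simp only [Bool.not_eq_true', List.any_eq_false, beq_iff_eq]
    rw [show ((ds.countP (fun d => d.contains p) : Int) = 0 + ds.length)
          ↔ (ds.countP (fun d => d.contains p) = ds.length) from by omega]
    rw [List.countP_eq_length]
    simp
  rw [hfilter]
  exact (PySem.Set.ofList_eq_self_of_nodup _ (List.Nodup.filter _ hUnodup)).symm

-- ===== VERDICT (by name: the statement is the Claim_ definition above) =====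
theorem get_least_general_generalization_spec : Claim_equal_get_least_general_generalization := by
  intro ds _
  unfold Spec_get_least_general_generalization
  exact get_least_general_generalization_eq ds
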